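-- pv_equiv track=rewrite | github.com/Stake2/Python | Modules/Watch_History/Watch_History/__init__.py | Add_To_Index
-- ===== SOURCE A (Python) =====
-- def Add_To_Index(dictionary, original_key, new_key, new_value):
-- 	# List the keys of the dictionary
-- 	keys = list(dictionary.keys())
--
-- 	# Checks if the original key exists inside the dictionary
-- 	if original_key not in keys:
-- 		# Returns the original dictionary if not
-- 		return dictionary
--
-- 	# Get the index of the original key
-- 	index = keys.index(original_key)
--
-- 	# Define a new local dictionary
-- 	new_dictionary = {}
--
-- 	# Iterate through the indexes and keys of the list of keys
-- 	for i, key in enumerate(keys):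
-- 		# If the "i" variable is the index we are looking for
-- 		if i == index:
-- 			# Replace the original key with the new key
-- 			new_dictionary[new_key] = new_value
--
-- 		else:
-- 			# Add the original key that existed before
-- 			new_dictionary[key] = dictionary[key]
--
-- 	# Return the new dictionary
-- 	return new_dictionary
-- ===== SOURCE B (Python) =====
-- def Add_To_Index(dictionary, original_key, new_key, new_value):
-- 	items = iter(dictionary.items())
-- 	prefix = []
-- 	for key, value in items:
-- 		if key == original_key:
-- 			# Splice: everything before the match, the replacement, the unconsumed rest.
-- 			return dict(prefix + [(new_key, new_value)] + list(items))
-- 		prefix.append((key, value))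
-- 	return dictionary
-- ===== Notes on version B (the rewrite author's own statement) =====
-- stated objective: alternative
-- what changed: A pre-checks membership, computes the key's index with list.index, and runs a full enumerate loop inserting either the replacement pair or the old pair at every position; B makes one iterator pass with no membership test and no index arithmetic, accumulating the prefix and early-returning the bulk splice dict(prefix + [(new_key, new_value)] + list(rest)) at the first matching key.
import Mathlib
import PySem

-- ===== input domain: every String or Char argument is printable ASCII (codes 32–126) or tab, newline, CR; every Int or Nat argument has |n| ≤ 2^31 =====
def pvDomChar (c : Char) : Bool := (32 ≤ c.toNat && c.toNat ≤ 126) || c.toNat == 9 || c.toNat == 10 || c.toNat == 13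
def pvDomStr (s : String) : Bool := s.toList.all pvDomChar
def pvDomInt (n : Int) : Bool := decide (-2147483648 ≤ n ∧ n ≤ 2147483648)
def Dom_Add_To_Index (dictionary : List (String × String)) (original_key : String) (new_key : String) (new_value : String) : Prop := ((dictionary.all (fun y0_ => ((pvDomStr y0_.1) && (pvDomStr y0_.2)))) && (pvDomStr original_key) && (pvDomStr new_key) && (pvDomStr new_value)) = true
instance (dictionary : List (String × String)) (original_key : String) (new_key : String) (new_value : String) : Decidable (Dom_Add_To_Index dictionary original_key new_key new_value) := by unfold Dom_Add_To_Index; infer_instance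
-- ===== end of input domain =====

-- B replaces A's membership-check + index + enumerate loop by a single iterator pass with an
-- early-return splice (prefix ++ replacement ++ unconsumed rest) and one bulk dict rebuild; same cost.


-- ===== PORT A =====
-- the dict argument arrives as an association list; PySem.Dict.ofList is the dict it denotes
def Add_To_Index (dictionary : List (String × String)) (original_key : String) (new_key : String) (new_value : String) : List (String × String) :=
  let d : PySem.Dict String String := PySem.Dict.ofList dictionary
  let keys := d.keys
  if original_key ∈ keys then
    let index : Int := ((PySem.List.index? keys original_key).getD 0 : Nat)
    let new_dictionary := (PySem.List.enumerate keys 0).foldl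
      (fun nd p => if p.1 = index then nd.insert new_key new_value
                   else nd.insert p.2 (d.getD p.2 "")) PySem.Dict.empty
    new_dictionary.items
  else
    d.items

-- ===== PORT B =====
-- B's loop: consume the item list, accumulating the prefix; at the first key match return the splice
def pvSplice (original_key new_key new_value : String) (pre : List (String × String)) : List (String × String) → Option (List (String × String))
  | [] => none
  | (key, value) :: rest =>
    if key = original_key then some (pre ++ [(new_key, new_value)] ++ rest)
    else pvSplice original_key new_key new_value (pre ++ [(key, value)]) rest

def Add_To_Index_alt (dictionary : List (String × String)) (original_key : String) (new_key : String) (new_value : String) : List (String × String) :=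
  let d : PySem.Dict String String := PySem.Dict.ofList dictionary
  match pvSplice original_key new_key new_value [] d.items with
  | none => d.items
  | some result => (PySem.Dict.ofList result).items

-- ===== PRECONDITION & SPEC =====
def Spec_Add_To_Index (dictionary : List (String × String)) (original_key : String) (new_key : String) (new_value : String) (out : List (String × String)) : Prop := out = Add_To_Index_alt dictionary original_key new_key new_value
instance (dictionary : List (String × String)) (original_key : String) (new_key : String) (new_value : String) (out : List (String × String)) : Decidable (Spec_Add_To_Index dictionary original_key new_key new_value out) := by unfold Spec_Add_To_Index; infer_instance

-- ===== CLAIM (what is proved, stated in full; the proofs are below) =====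
def Claim_equal_Add_To_Index : Prop := ∀ (dictionary : List (String × String)) (original_key : String) (new_key : String) (new_value : String), Dom_Add_To_Index dictionary original_key new_key new_value → Spec_Add_To_Index dictionary original_key new_key new_value (Add_To_Index dictionary original_key new_key new_value)

-- ===== LEMMAS AND PROOFS =====

-- B's loop characterised: early-return splice IS set at the first key index (prefix generalised)
lemma pvSplice_eq (ok nk nv : String) : ∀ (l pre : List (String × String)),
    pvSplice ok nk nv pre l = (PySem.List.index? (l.map (·.1)) ok).map (fun i => pre ++ l.set i (nk, nv)) := by
  intro l
  induction l with
  | nil => intro pre; simp [pvSplice, PySem.List.index?]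
  | cons p rest ih =>
    intro pre
    obtain ⟨k, v⟩ := p
    by_cases hk : k = ok
    · subst hk
      rw [show (((k, v) :: rest).map (·.1)) = k :: rest.map (·.1) from rfl,
          PySem.List.index?_cons_self]
      simp [pvSplice]
    · rw [show (((k, v) :: rest).map (·.1)) = k :: rest.map (·.1) from rfl,
          PySem.List.index?_cons_of_ne _ hk]
      simp only [pvSplice, if_neg hk, ih, PySem.List.index?_eq_idxOf?, Option.map_map]
      exact Option.map_congr fun a _ => by simp

-- A's loop after the replaced position: a plain insert-fold of the remaining (key, value) pairs
lemma foldA_lt (d : PySem.Dict String String) (nk nv : String) (idx : Nat) :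
    ∀ (ks : List String) (s : Nat) (acc : PySem.Dict String String), idx < s →
    (PySem.List.enumerate ks (s : Int)).foldl
      (fun nd p => if p.1 = (idx : Int) then nd.insert nk nv else nd.insert p.2 (d.getD p.2 "")) acc
    = (ks.map (fun k => (k, d.getD k ""))).foldl (fun nd q => nd.insert q.1 q.2) acc := by
  intro ks
  induction ks with
  | nil => intro s acc _; simp [PySem.List.enumerate_nil]
  | cons k ks ih =>
    intro s acc h
    rw [PySem.List.enumerate_cons]
    have hne : ((s : Int)) ≠ (idx : Int) := by exact_mod_cast Nat.ne_of_gt h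
    simp only [List.foldl_cons, List.map_cons, if_neg hne]
    have : ((s : Int) + 1) = ((s + 1 : Nat) : Int) := by push_cast; ring
    rw [this, ih (s + 1) _ (Nat.lt_succ_of_lt h)]

-- A's loop with the replaced position still ahead: an insert-fold of the pairs with slot idx-s overwritten
lemma foldA_ge (d : PySem.Dict String String) (nk nv : String) (idx : Nat) :
    ∀ (ks : List String) (s : Nat) (acc : PySem.Dict String String), s ≤ idx →
    (PySem.List.enumerate ks (s : Int)).foldl
      (fun nd p => if p.1 = (idx : Int) then nd.insert nk nv else nd.insert p.2 (d.getD p.2 "")) acc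
    = ((ks.map (fun k => (k, d.getD k ""))).set (idx - s) (nk, nv)).foldl (fun nd q => nd.insert q.1 q.2) acc := by
  intro ks
  induction ks with
  | nil => intro s acc _; simp [PySem.List.enumerate_nil]
  | cons k ks ih =>
    intro s acc h
    rw [PySem.List.enumerate_cons]
    by_cases hs : s = idx
    · subst hs
      simp only [List.foldl_cons, List.map_cons, if_pos, Nat.sub_self, List.set_cons_zero]
      have : ((s : Int) + 1) = ((s + 1 : Nat) : Int) := by push_cast; ring
      rw [this, foldA_lt d nk nv s ks (s + 1) _ (Nat.lt_succ_self s)]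
    · have hlt : s < idx := lt_of_le_of_ne h hs
      have hne : ((s : Int)) ≠ (idx : Int) := by exact_mod_cast Nat.ne_of_lt hlt
      have hsub : idx - s = (idx - (s + 1)) + 1 := by omega
      simp only [List.foldl_cons, List.map_cons, if_neg hne, hsub, List.set_cons_succ]
      have : ((s : Int) + 1) = ((s + 1 : Nat) : Int) := by push_cast; ring
      rw [this, ih (s + 1) _ hlt]

-- ===== VERDICT (by name: the statement is the Claim_ definition above) =====
theorem Add_To_Index_spec : Claim_equal_Add_To_Index := by
  intro dictionary original_key new_key new_value _
  unfold Spec_Add_To_Index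
  simp only [Add_To_Index, Add_To_Index_alt]
  rw [pvSplice_eq,
      show (PySem.Dict.ofList dictionary : PySem.Dict String String).items.map (·.1)
         = (PySem.Dict.ofList dictionary : PySem.Dict String String).keys from rfl]
  by_cases hmem : original_key ∈ (PySem.Dict.ofList dictionary : PySem.Dict String String).keys
  · obtain ⟨i, hi⟩ := Option.isSome_iff_exists.mp
      ((PySem.List.index?_isSome_iff _ _).mpr hmem)
    rw [hi]
    simp only [if_pos hmem, Option.getD_some, Option.map_some, List.nil_append]
    refine congrArg PySem.Dict.items
      ((foldA_ge (PySem.Dict.ofList dictionary) new_key new_value i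
          (PySem.Dict.ofList dictionary : PySem.Dict String String).keys 0 PySem.Dict.empty
          (Nat.zero_le i)).trans ?_)
    rw [Nat.sub_zero, ← PySem.Dict.items_eq_map_keys (PySem.Dict.ofList dictionary)
          (PySem.Dict.nodup_keys_ofList dictionary) ""]
    rfl
  · rw [(PySem.List.index?_eq_none_iff _ _).mpr hmem, if_neg hmem]
    rfl
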